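-- pv_equiv track=rewrite | github.com/StoyanStoyanov1/Python-Advanced | functions_advanced/exercises/negative_vs_positive.py | positive_vs_negative
-- ===== SOURCE A (Python) =====
-- def positive_vs_negative(numbers):
--     positive = []
--     negative = []
--
--     for num in numbers:
--         if num > 0:
--             positive.append(num)
--         else:
--             negative.append(num)
--
--     if sum(positive) > abs(sum(negative)):
--         return f"{sum(negative)}\n{sum(positive)}\nThe positives are stronger than the negatives"
--     else:
--         return f"{sum(negative)}\n{sum(positive)}\nThe negatives are stronger than the positives"
-- ===== SOURCE B (Python) =====
-- def positive_vs_negative(numbers):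
--     pos_sum = 0
--     neg_sum = 0
--     for num in numbers:
--         if num > 0:
--             pos_sum += num
--         else:
--             neg_sum += num
--     if pos_sum > abs(neg_sum):
--         return f"{neg_sum}\n{pos_sum}\nThe positives are stronger than the negatives"
--     return f"{neg_sum}\n{pos_sum}\nThe negatives are stronger than the positives"
-- ===== Notes on version B (the rewrite author's own statement) =====
-- stated objective: simpler
-- what changed: Replaces the two intermediate lists and the repeated sum() passes with two scalar accumulators maintained in a single loop.
import Mathlib
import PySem

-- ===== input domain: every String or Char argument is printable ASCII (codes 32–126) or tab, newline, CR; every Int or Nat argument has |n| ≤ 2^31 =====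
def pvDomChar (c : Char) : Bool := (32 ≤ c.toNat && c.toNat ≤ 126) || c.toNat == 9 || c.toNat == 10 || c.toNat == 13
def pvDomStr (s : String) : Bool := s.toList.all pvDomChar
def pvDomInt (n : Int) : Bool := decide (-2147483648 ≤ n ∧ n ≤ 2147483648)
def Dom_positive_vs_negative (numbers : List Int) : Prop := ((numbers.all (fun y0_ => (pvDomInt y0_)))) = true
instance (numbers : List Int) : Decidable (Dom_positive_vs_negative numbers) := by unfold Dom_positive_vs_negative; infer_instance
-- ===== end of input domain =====

-- B: single-pass scalar accumulators instead of building two lists and summing them (simpler, O(1) extra space).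


-- ===== PORT A =====
def positive_vs_negative (numbers : List Int) : String :=
  let pn := numbers.foldl (fun (pn : List Int × List Int) num =>
      if num > 0 then (pn.1 ++ [num], pn.2) else (pn.1, pn.2 ++ [num])) ([], [])
  if pn.1.foldl (· + ·) 0 > |pn.2.foldl (· + ·) 0| then
    PySem.Int.toStr (pn.2.foldl (· + ·) 0) ++ "\n" ++ PySem.Int.toStr (pn.1.foldl (· + ·) 0)
      ++ "\nThe positives are stronger than the negatives"
  else
    PySem.Int.toStr (pn.2.foldl (· + ·) 0) ++ "\n" ++ PySem.Int.toStr (pn.1.foldl (· + ·) 0)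
      ++ "\nThe negatives are stronger than the positives"

-- ===== PORT B =====
def positive_vs_negative_alt (numbers : List Int) : String :=
  let s := numbers.foldl (fun (acc : Int × Int) num =>
      if num > 0 then (acc.1 + num, acc.2) else (acc.1, acc.2 + num)) (0, 0)
  if s.1 > |s.2| then
    PySem.Int.toStr s.2 ++ "\n" ++ PySem.Int.toStr s.1
      ++ "\nThe positives are stronger than the negatives"
  else
    PySem.Int.toStr s.2 ++ "\n" ++ PySem.Int.toStr s.1
      ++ "\nThe negatives are stronger than the positives"

-- ===== PRECONDITION & SPEC =====
def Spec_positive_vs_negative (numbers : List Int) (out : String) : Prop := out = positive_vs_negative_alt numbers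
instance (numbers : List Int) (out : String) : Decidable (Spec_positive_vs_negative numbers out) := by unfold Spec_positive_vs_negative; infer_instance

-- ===== CLAIM (what is proved, stated in full; the proofs are below) =====
def Claim_equal_positive_vs_negative : Prop := ∀ (numbers : List Int), Dom_positive_vs_negative numbers → Spec_positive_vs_negative numbers (positive_vs_negative numbers)

-- ===== LEMMAS AND PROOFS =====

-- ===== VERDICT (by name: the statement is the Claim_ definition above) =====
lemma pv_fold_sums (numbers : List Int) (p n : List Int) :
    ((numbers.foldl (fun (pn : List Int × List Int) num =>
        if num > 0 then (pn.1 ++ [num], pn.2) else (pn.1, pn.2 ++ [num])) (p, n)).1.foldl (· + ·) 0,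
     (numbers.foldl (fun (pn : List Int × List Int) num =>
        if num > 0 then (pn.1 ++ [num], pn.2) else (pn.1, pn.2 ++ [num])) (p, n)).2.foldl (· + ·) 0)
    = numbers.foldl (fun (acc : Int × Int) num =>
        if num > 0 then (acc.1 + num, acc.2) else (acc.1, acc.2 + num))
        (p.foldl (· + ·) 0, n.foldl (· + ·) 0) := by
  induction numbers generalizing p n with
  | nil => simp
  | cons x xs ih =>
    simp only [List.foldl_cons]
    by_cases hx : x > 0
    · simpa [hx, List.foldl_append] using ih (p ++ [x]) n
    · simpa [hx, List.foldl_append] using ih p (n ++ [x])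

theorem positive_vs_negative_spec : Claim_equal_positive_vs_negative := by
  intro numbers _
  unfold Spec_positive_vs_negative positive_vs_negative positive_vs_negative_alt
  have h := pv_fold_sums numbers [] []
  simp only [List.foldl_nil] at h
  rw [← h]
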